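-- pv_equiv track=rewrite | github.com/s27183/acr-agi-3-agents | agents/rl/terrain_analyzer.py | _get_player_surrounding_area
-- ===== SOURCE A (Python) =====
-- from typing import Dict, Any, List, Tuple, Optional
--
-- def _get_player_surrounding_area(player_position: Tuple[int, int],
--                                 player_shape: List[Tuple[int, int]],
--                                 grid_shape: Tuple[int, int],
--                                 buffer_size: int = 2) -> List[Tuple[int, int]]:
--     """
--     Get positions surrounding the player shape with a buffer.
--
--     Args:
--         player_position: Player's top-left corner (row, col)
--         player_shape: List of relative offsets defining player shape
--         grid_shape: Shape of the grid (rows, cols)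
--         buffer_size: Number of cells to extend around player shape
--
--     Returns:
--         List of (row, col) positions surrounding the player
--     """
--     player_row, player_col = player_position
--
--     # Find bounding box of player shape
--     min_rel_row = min(offset[0] for offset in player_shape)
--     max_rel_row = max(offset[0] for offset in player_shape)
--     min_rel_col = min(offset[1] for offset in player_shape)
--     max_rel_col = max(offset[1] for offset in player_shape)
--
--     # Expand bounding box by buffer size
--     start_row = player_row + min_rel_row - buffer_size
--     end_row = player_row + max_rel_row + buffer_size + 1
--     start_col = player_col + min_rel_col - buffer_size
--     end_col = player_col + max_rel_col + buffer_size + 1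
--
--     # Collect all positions in expanded area, excluding player shape itself
--     surrounding_positions = []
--     player_absolute_positions = {
--         (player_row + rel_row, player_col + rel_col)
--         for rel_row, rel_col in player_shape
--     }
--
--     for row in range(start_row, end_row):
--         for col in range(start_col, end_col):
--             if (row, col) not in player_absolute_positions:
--                 surrounding_positions.append((row, col))
--
--     return surrounding_positions
-- ===== SOURCE B (Python) =====
-- def _get_player_surrounding_area(player_position, player_shape, grid_shape, buffer_size=2):
--     player_row, player_col = player_position
--
--     # Bounding box of the player shape (min/max raise ValueError on an empty shape, as in A)
--     min_rel_row = min(offset[0] for offset in player_shape)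
--     max_rel_row = max(offset[0] for offset in player_shape)
--     min_rel_col = min(offset[1] for offset in player_shape)
--     max_rel_col = max(offset[1] for offset in player_shape)
--
--     start_row = player_row + min_rel_row - buffer_size
--     end_row = player_row + max_rel_row + buffer_size + 1
--     start_col = player_col + min_rel_col - buffer_size
--     end_col = player_col + max_rel_col + buffer_size + 1
--
--     # Player columns grouped by absolute row: only these few rows need any exclusion work.
--     cols_by_row = {}
--     for rel_row, rel_col in player_shape:
--         cols_by_row.setdefault(player_row + rel_row, []).append(player_col + rel_col)
--
--     surrounding_positions = []
--     for row in range(start_row, end_row):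
--         cols = cols_by_row.get(row)
--         if cols is None:
--             # whole row survives: emit it as one contiguous run
--             surrounding_positions.extend((row, col) for col in range(start_col, end_col))
--         else:
--             # split the row into runs between the sorted excluded columns
--             bounds = sorted(set(cols))
--             c = start_col
--             for b in bounds:
--                 if b < c:
--                     continue
--                 if b >= end_col:
--                     break
--                 surrounding_positions.extend((row, col) for col in range(c, b))
--                 c = b + 1
--             surrounding_positions.extend((row, col) for col in range(c, end_col))
--
--     return surrounding_positions
-- ===== Notes on version B (the rewrite author's own statement) =====
-- stated objective: alternative
-- what changed: The per-cell membership test against a global set of player positions is replaced by grouping the player's columns by row in a dict and emitting each row of the expanded box as contiguous column runs split at that row's sorted excluded columns.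
import Mathlib
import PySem

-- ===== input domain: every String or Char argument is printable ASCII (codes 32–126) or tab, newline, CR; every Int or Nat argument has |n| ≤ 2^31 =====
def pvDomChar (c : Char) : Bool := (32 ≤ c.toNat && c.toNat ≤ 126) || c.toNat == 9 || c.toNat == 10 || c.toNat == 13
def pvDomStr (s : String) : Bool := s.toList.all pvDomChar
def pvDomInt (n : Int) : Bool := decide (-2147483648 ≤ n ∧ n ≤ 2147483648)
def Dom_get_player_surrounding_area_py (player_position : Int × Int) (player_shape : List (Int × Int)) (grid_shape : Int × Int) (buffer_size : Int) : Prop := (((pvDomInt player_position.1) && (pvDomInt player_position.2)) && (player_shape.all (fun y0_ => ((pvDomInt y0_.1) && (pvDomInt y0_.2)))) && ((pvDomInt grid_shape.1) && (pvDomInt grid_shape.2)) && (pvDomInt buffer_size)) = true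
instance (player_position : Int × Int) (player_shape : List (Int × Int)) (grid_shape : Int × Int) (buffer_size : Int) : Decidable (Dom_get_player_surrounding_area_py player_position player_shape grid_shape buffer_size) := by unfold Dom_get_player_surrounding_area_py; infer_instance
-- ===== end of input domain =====

-- B groups the player's columns by row in a dict and emits each row of the expanded box as
-- contiguous column runs split at the sorted excluded columns, instead of A's per-cell membership
-- test against the global set of player positions (alternative decomposition).


-- ===== PORT A =====
def get_player_surrounding_area_py (player_position : Int × Int) (player_shape : List (Int × Int)) (grid_shape : Int × Int) (buffer_size : Int) : List (Int × Int) :=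
  let player_row := player_position.1
  let player_col := player_position.2
  match PySem.List.min? (player_shape.map (fun o => o.1)) (fun x => x),
        PySem.List.max? (player_shape.map (fun o => o.1)) (fun x => x),
        PySem.List.min? (player_shape.map (fun o => o.2)) (fun x => x),
        PySem.List.max? (player_shape.map (fun o => o.2)) (fun x => x) with
  | some min_rel_row, some max_rel_row, some min_rel_col, some max_rel_col =>
      let start_row := player_row + min_rel_row - buffer_size
      let end_row := player_row + max_rel_row + buffer_size + 1
      let start_col := player_col + min_rel_col - buffer_size
      let end_col := player_col + max_rel_col + buffer_size + 1
      let player_absolute_positions : PySem.Set (Int × Int) :=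
        PySem.Set.ofList (player_shape.map (fun rc => (player_row + rc.1, player_col + rc.2)))
      (PySem.List.pyRange start_row end_row 1).foldl (fun acc row =>
        (PySem.List.pyRange start_col end_col 1).foldl (fun acc2 col =>
          if player_absolute_positions.contains (row, col) then acc2
          else acc2 ++ [(row, col)]) acc) []
  | _, _, _, _ => []  -- unreached under Pre_ (Python raises ValueError on an empty shape)

-- ===== PORT B =====
-- B's inner run loop: `for b in bounds: if b < c: continue; if b >= end_col: break; emit range(c, b); c = b + 1`
-- followed by the trailing `emit range(c, end_col)`
def pvSegLoop (row end_col : Int) : List Int → Int → List (Int × Int) → List (Int × Int)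
  | [], c, acc => acc ++ (PySem.List.pyRange c end_col 1).map (fun col => (row, col))
  | b :: bs, c, acc =>
      if b < c then pvSegLoop row end_col bs c acc
      else if end_col ≤ b then acc ++ (PySem.List.pyRange c end_col 1).map (fun col => (row, col))
      else pvSegLoop row end_col bs (b + 1) (acc ++ (PySem.List.pyRange c b 1).map (fun col => (row, col)))

def get_player_surrounding_area_py_alt (player_position : Int × Int) (player_shape : List (Int × Int)) (grid_shape : Int × Int) (buffer_size : Int) : List (Int × Int) :=
  let player_row := player_position.1
  let player_col := player_position.2
  match PySem.List.min? (player_shape.map (fun o => o.1)) (fun x => x) with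
  | none => []  -- unreached under Pre_ (Python raises ValueError on an empty shape)
  | some min_rel_row =>
  match PySem.List.max? (player_shape.map (fun o => o.1)) (fun x => x) with
  | none => []
  | some max_rel_row =>
  match PySem.List.min? (player_shape.map (fun o => o.2)) (fun x => x) with
  | none => []
  | some min_rel_col =>
  match PySem.List.max? (player_shape.map (fun o => o.2)) (fun x => x) with
  | none => []
  | some max_rel_col =>
      let start_row := player_row + min_rel_row - buffer_size
      let end_row := player_row + max_rel_row + buffer_size + 1
      let start_col := player_col + min_rel_col - buffer_size
      let end_col := player_col + max_rel_col + buffer_size + 1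
      -- cols_by_row: setdefault(row, []).append(col), i.e. modify with default []
      let cols_by_row : PySem.Dict Int (List Int) :=
        player_shape.foldl (fun d rc =>
          d.modify (player_row + rc.1) [] (fun l => l ++ [player_col + rc.2])) PySem.Dict.empty
      (PySem.List.pyRange start_row end_row 1).foldl (fun acc row =>
        match cols_by_row.get? row with
        | none => acc ++ (PySem.List.pyRange start_col end_col 1).map (fun col => (row, col))
        | some cols =>
            pvSegLoop row end_col
              (PySem.List.sorted (PySem.Set.ofList cols) (fun x => x) false) start_col acc) []

-- ===== PRECONDITION & SPEC =====
-- Pre_ excludes only the empty player_shape, on which A's min() raises ValueError (B's min() raises there too).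
def Pre_get_player_surrounding_area_py (player_position : Int × Int) (player_shape : List (Int × Int)) (grid_shape : Int × Int) (buffer_size : Int) : Prop := player_shape ≠ []
instance (player_position : Int × Int) (player_shape : List (Int × Int)) (grid_shape : Int × Int) (buffer_size : Int) : Decidable (Pre_get_player_surrounding_area_py player_position player_shape grid_shape buffer_size) := by unfold Pre_get_player_surrounding_area_py; infer_instance
def pvWitness_get_player_surrounding_area_py : (Int × Int) × (List (Int × Int)) × (Int × Int) × Int := ((1, 1), [(0, 0), (0, 1)], (6, 6), 1)

def Spec_get_player_surrounding_area_py (player_position : Int × Int) (player_shape : List (Int × Int)) (grid_shape : Int × Int) (buffer_size : Int) (out : List (Int × Int)) : Prop := out = get_player_surrounding_area_py_alt player_position player_shape grid_shape buffer_size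
instance (player_position : Int × Int) (player_shape : List (Int × Int)) (grid_shape : Int × Int) (buffer_size : Int) (out : List (Int × Int)) : Decidable (Spec_get_player_surrounding_area_py player_position player_shape grid_shape buffer_size out) := by unfold Spec_get_player_surrounding_area_py; infer_instance

-- ===== CLAIM (what is proved, stated in full; the proofs are below) =====
def Claim_equal_get_player_surrounding_area_py : Prop := ∀ (player_position : Int × Int) (player_shape : List (Int × Int)) (grid_shape : Int × Int) (buffer_size : Int), Dom_get_player_surrounding_area_py player_position player_shape grid_shape buffer_size → Pre_get_player_surrounding_area_py player_position player_shape grid_shape buffer_size → Spec_get_player_surrounding_area_py player_position player_shape grid_shape buffer_size (get_player_surrounding_area_py player_position player_shape grid_shape buffer_size)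

-- ===== LEMMAS AND PROOFS =====

-- A's inner loop, with the branch order of the Python (append in the else branch)
lemma pv_foldl_append_ifnot {α β : Type} (p : α → Bool) (f : α → β) (l : List α) (acc : List β) :
    l.foldl (fun acc x => if p x then acc else acc ++ [f x]) acc
      = acc ++ (l.filter (fun x => !p x)).map f := by
  induction l generalizing acc with
  | nil => simp
  | cons x t ih =>
      by_cases h : p x = true <;> simp [h, ih, List.append_assoc]

-- A's nested loops produce the filtered row-major enumeration of the box
lemma pv_nested_loop (rows cols : List Int) (p : Int × Int → Bool) (acc : List (Int × Int)) :
    rows.foldl (fun acc row =>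
        cols.foldl (fun acc2 col => if p (row, col) then acc2 else acc2 ++ [(row, col)]) acc) acc
      = acc ++ (rows.flatMap (fun row => cols.map (fun col => (row, col)))).filter (fun x => !p x) := by
  induction rows generalizing acc with
  | nil => simp
  | cons r t ih =>
      simp only [List.foldl_cons, List.flatMap_cons, List.filter_append, List.filter_map]
      rw [pv_foldl_append_ifnot (fun col => p (r, col)) (fun col => (r, col)) cols acc, ih,
        List.append_assoc]
      rfl

-- B's run loop emits exactly the columns of [c, ec) that are not among the (strictly sorted) bounds
lemma pv_segLoop_eq (row ec : Int) (bs : List Int) (hp : bs.Pairwise (· < ·)) :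
    ∀ (c : Int) (acc : List (Int × Int)),
      pvSegLoop row ec bs c acc
        = acc ++ ((PySem.List.pyRange c ec 1).filter (fun x => !bs.contains x)).map
            (fun col => (row, col)) := by
  induction bs with
  | nil => intro c acc; simp [pvSegLoop]
  | cons b bs ih =>
      rw [List.pairwise_cons] at hp
      intro c acc
      by_cases h1 : b < c
      · rw [pvSegLoop, if_pos h1, ih hp.2 c acc]
        congr 2
        apply List.filter_congr
        intro x hx
        rw [PySem.List.mem_pyRange_one] at hx
        have hxb : (x == b) = false := by simp; omega
        rw [List.contains_cons, hxb, Bool.false_or]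
      · by_cases h2 : ec ≤ b
        · rw [pvSegLoop, if_neg h1, if_pos h2]
          congr 1
          have hall : ∀ x ∈ PySem.List.pyRange c ec 1, (!(b :: bs).contains x) = true := by
            intro x hx
            rw [PySem.List.mem_pyRange_one] at hx
            have hxb : (x == b) = false := by simp; omega
            have hb2 : bs.contains x = false := by
              simp only [List.contains_eq_mem, decide_eq_false_iff_not]
              intro hxm; have := hp.1 x hxm; omega
            rw [List.contains_cons, hxb, hb2, Bool.or_self, Bool.not_false]
          rw [List.filter_eq_self.mpr hall]
        · rw [pvSegLoop, if_neg h1, if_neg h2, ih hp.2 (b + 1) _]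
          have hcons : PySem.List.pyRange b ec 1 = b :: PySem.List.pyRange (b + 1) ec 1 :=
            PySem.List.pyRange_one_cons (by omega)
          have hsplit : PySem.List.pyRange c ec 1
              = PySem.List.pyRange c b 1 ++ b :: PySem.List.pyRange (b + 1) ec 1 := by
            rw [PySem.List.pyRange_one_append c b ec (by omega) (by omega), hcons]
          have hfirst : (PySem.List.pyRange c b 1).filter (fun x => !(b :: bs).contains x)
              = PySem.List.pyRange c b 1 := by
            apply List.filter_eq_self.mpr
            intro x hx
            rw [PySem.List.mem_pyRange_one] at hx
            have hxb : (x == b) = false := by simp; omega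
            have hb2 : bs.contains x = false := by
              simp only [List.contains_eq_mem, decide_eq_false_iff_not]
              intro hxm; have := hp.1 x hxm; omega
            rw [List.contains_cons, hxb, hb2, Bool.or_self, Bool.not_false]
          have hsecond : (PySem.List.pyRange (b + 1) ec 1).filter (fun x => !(b :: bs).contains x)
              = (PySem.List.pyRange (b + 1) ec 1).filter (fun x => !bs.contains x) := by
            apply List.filter_congr
            intro x hx
            rw [PySem.List.mem_pyRange_one] at hx
            have hxb : (x == b) = false := by simp; omega
            rw [List.contains_cons, hxb, Bool.false_or]
          rw [hsplit]
          simp only [List.filter_append, List.filter_cons, hfirst, hsecond]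
          simp [List.append_assoc]

-- ===== VERDICT (by name: the statement is the Claim_ definition above) =====
theorem get_player_surrounding_area_py_spec : Claim_equal_get_player_surrounding_area_py := by
  intro pp shape gs buf _ hpre
  unfold Pre_get_player_surrounding_area_py at hpre
  unfold Spec_get_player_surrounding_area_py
  unfold get_player_surrounding_area_py get_player_surrounding_area_py_alt
  cases h1 : PySem.List.min? (shape.map (fun o => o.1)) (fun x => x) with
  | none => simp [PySem.List.min?_eq_none_iff] at h1; simp [h1] at hpre
  | some minR =>
  cases h2 : PySem.List.max? (shape.map (fun o => o.1)) (fun x => x) with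
  | none => simp [PySem.List.max?_eq_none_iff] at h2; simp [h2] at hpre
  | some maxR =>
  cases h3 : PySem.List.min? (shape.map (fun o => o.2)) (fun x => x) with
  | none => simp [PySem.List.min?_eq_none_iff] at h3; simp [h3] at hpre
  | some minC =>
  cases h4 : PySem.List.max? (shape.map (fun o => o.2)) (fun x => x) with
  | none => simp [PySem.List.max?_eq_none_iff] at h4; simp [h4] at hpre
  | some maxC =>
  simp only
  set sr := pp.1 + minR - buf
  set er := pp.1 + maxR + buf + 1
  set sc := pp.2 + minC - buf
  set ec := pp.2 + maxC + buf + 1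
  set pset : PySem.Set (Int × Int) :=
    PySem.Set.ofList (shape.map (fun rc => (pp.1 + rc.1, pp.2 + rc.2))) with hpset
  set d : PySem.Dict Int (List Int) :=
    shape.foldl (fun d rc => d.modify (pp.1 + rc.1) [] (fun l => l ++ [pp.2 + rc.2]))
      PySem.Dict.empty with hd
  -- closed form of the per-row dict
  have hgetD : ∀ r, d.getD r []
      = ((shape.map (fun rc => (pp.1 + rc.1, pp.2 + rc.2))).filter (fun p => p.1 == r)).map
          (fun p => p.2) := by
    intro r
    have h := PySem.Dict.getD_foldl_modify_append
      (shape.map (fun rc => (pp.1 + rc.1, pp.2 + rc.2))) PySem.Dict.empty r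
    rw [List.foldl_map] at h
    simpa using h
  -- the common per-row content
  have hrow : ∀ (row : Int) (acc : List (Int × Int)),
      (match d.get? row with
        | none => acc ++ (PySem.List.pyRange sc ec 1).map (fun col => (row, col))
        | some cols =>
            pvSegLoop row ec (PySem.List.sorted (PySem.Set.ofList cols) (fun x => x) false) sc acc)
      = acc ++
          ((PySem.List.pyRange sc ec 1).filter (fun col => !pset.contains (row, col))).map
            (fun col => (row, col)) := by
    intro row acc
    cases hg : d.get? row with
    | none =>
        have hz := hgetD row
        rw [PySem.Dict.getD_of_get?_eq_none d [] hg] at hz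
        have hfil : (shape.map (fun rc => (pp.1 + rc.1, pp.2 + rc.2))).filter
            (fun p => p.1 == row) = [] := List.map_eq_nil_iff.mp hz.symm
        have hmem : ∀ col : Int, pset.contains (row, col) = false := by
          intro col
          rw [hpset]
          simp only [PySem.Set.contains, List.contains_eq_mem, decide_eq_false_iff_not,
            PySem.Set.mem_ofList]
          intro hin
          have hmem2 : (row, col) ∈ (shape.map (fun rc => (pp.1 + rc.1, pp.2 + rc.2))).filter
              (fun p => p.1 == row) := List.mem_filter.mpr ⟨hin, by simp⟩
          rw [hfil] at hmem2
          simp at hmem2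
        simp only
        congr 1
        rw [List.filter_eq_self.mpr (fun x _ => by rw [hmem x]; rfl)]
    | some cols =>
        have hc : cols = ((shape.map (fun rc => (pp.1 + rc.1, pp.2 + rc.2))).filter
            (fun p => p.1 == row)).map (fun p => p.2) := by
          rw [← hgetD row, PySem.Dict.getD_of_get?_eq_some d [] hg]
        have hmemiff : ∀ col : Int,
            (col ∈ cols) ↔ ((row, col) ∈ shape.map (fun rc => (pp.1 + rc.1, pp.2 + rc.2))) := by
          intro col
          rw [hc]
          simp only [List.mem_map, List.mem_filter]
          constructor
          · rintro ⟨p, ⟨hp, hpr⟩, hp2⟩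
            have h1' : p.1 = row := by simpa using hpr
            obtain ⟨a, b⟩ := p
            simp only at h1' hp2
            subst h1'; subst hp2
            exact hp
          · intro hin
            exact ⟨(row, col), ⟨hin, by simp⟩, rfl⟩
        simp only
        rw [pv_segLoop_eq row ec _ (PySem.List.sorted_ofList_pairwise_lt cols) sc acc]
        congr 2
        apply List.filter_congr
        intro col _
        have hcc : ((PySem.List.sorted (PySem.Set.ofList cols) (fun x => x) false).contains col)
            = pset.contains (row, col) := by
          simp only [PySem.Set.contains, List.contains_eq_mem, PySem.List.mem_sorted,
            PySem.Set.mem_ofList, hpset]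
          rw [decide_eq_decide]
          exact hmemiff col
        rw [hcc]
  -- A's side: nested loops = filtered row-major enumeration
  rw [pv_nested_loop (PySem.List.pyRange sr er 1) (PySem.List.pyRange sc ec 1)
    (fun x => pset.contains x) [], List.nil_append, List.filter_flatMap]
  -- B's side: the outer foldl appends the common per-row content
  have hfun : (fun (acc : List (Int × Int)) row =>
      match d.get? row with
      | none => acc ++ (PySem.List.pyRange sc ec 1).map (fun col => (row, col))
      | some cols =>
          pvSegLoop row ec (PySem.List.sorted (PySem.Set.ofList cols) (fun x => x) false) sc acc)
      = fun acc row => acc ++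
          ((PySem.List.pyRange sc ec 1).filter (fun col => !pset.contains (row, col))).map
            (fun col => (row, col)) := by
    funext acc row
    exact hrow row acc
  rw [hfun, PySem.List.foldl_append_eq_flatMap, List.nil_append]
  congr 1
  funext row
  rw [List.filter_map]
  rfl
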